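-- pv_equiv track=rewrite | github.com/Anirudh-rao/Problem-Solving-With-Python | 5.Pattern Questions/9.FloydsTriangle.py | generate_floyds_triangle
-- ===== SOURCE A (Python) =====
-- def generate_floyds_triangle(n):
--     """
--     Function to return the first n rows of Floyd's Triangle as a list of strings.
--
--     Parameters:
--     n (int): The number of rows in the triangle.
--
--     Returns:
--     list: A list of strings where each string represents a row of Floyd's Triangle.
--     """
--     # Your code here
--     Triangle = []
--     #Initialize first number to be used in Triangle
--     current_num =  1
--     for i in range(1, n+1):
--         # create a row by collecting the next i numbers
--         row  = ' '.join(str(current_num + j) for j in range(i))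
--         # Append the row to the list
--         Triangle.append(row)
--         current_num += i
--     return Triangle
-- ===== SOURCE B (Python) =====
-- def generate_floyds_triangle(n):
--     """Floyd's triangle: each row computed independently from its closed-form start."""
--     return [' '.join(str(k) for k in range(i * (i - 1) // 2 + 1, i * (i - 1) // 2 + 1 + i))
--             for i in range(1, n + 1)]
-- ===== Notes on version B (the rewrite author's own statement) =====
-- stated objective: simpler
-- what changed: Replaces the stateful loop carrying a current_num accumulator with a single comprehension that computes each row independently from the closed-form triangular-number start i*(i-1)//2+1.
import Mathlib
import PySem

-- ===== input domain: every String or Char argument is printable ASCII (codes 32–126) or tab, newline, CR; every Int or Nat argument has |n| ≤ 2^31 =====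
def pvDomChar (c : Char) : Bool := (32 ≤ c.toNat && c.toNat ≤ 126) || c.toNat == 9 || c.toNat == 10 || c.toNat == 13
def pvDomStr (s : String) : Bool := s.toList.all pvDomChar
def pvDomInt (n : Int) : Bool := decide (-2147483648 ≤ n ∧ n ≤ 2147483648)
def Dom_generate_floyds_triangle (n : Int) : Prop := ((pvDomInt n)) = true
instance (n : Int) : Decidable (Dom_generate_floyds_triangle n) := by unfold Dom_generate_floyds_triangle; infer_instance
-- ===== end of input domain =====

-- B drops A's running current_num accumulator: each row is computed independently from its closed-form start (simpler decomposition; no speed claim).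

-- ===== PORT A =====
def generate_floyds_triangle (n : Int) : List String :=
  (((PySem.List.pyRange 1 (n + 1) 1).foldl
    (fun (st : List String × Int) i =>
      let row := PySem.Str.join " " ((PySem.List.pyRange 0 i 1).map (fun j => PySem.Int.toStr (st.2 + j)))
      (st.1 ++ [row], st.2 + i))
    ([], 1))).1

-- ===== PORT B =====
def generate_floyds_triangle_alt (n : Int) : List String :=
  (PySem.List.pyRange 1 (n + 1) 1).map (fun i =>
    let start := PySem.Int.floordiv (i * (i - 1)) 2 + 1
    PySem.Str.join " " ((PySem.List.pyRange start (start + i) 1).map PySem.Int.toStr))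

-- ===== PRECONDITION & SPEC =====
def Spec_generate_floyds_triangle (n : Int) (out : List String) : Prop := out = generate_floyds_triangle_alt n
instance (n : Int) (out : List String) : Decidable (Spec_generate_floyds_triangle n out) := by unfold Spec_generate_floyds_triangle; infer_instance

-- ===== CLAIM (what is proved, stated in full; the proofs are below) =====
def Claim_equal_generate_floyds_triangle : Prop := ∀ (n : Int), Dom_generate_floyds_triangle n → Spec_generate_floyds_triangle n (generate_floyds_triangle n)

-- ===== LEMMAS AND PROOFS =====

-- B's row function
def pvRowB (i : Int) : String :=
  let start := PySem.Int.floordiv (i * (i - 1)) 2 + 1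
  PySem.Str.join " " ((PySem.List.pyRange start (start + i) 1).map PySem.Int.toStr)

-- A's row, started at current_num c, equals the join of str over range c..c+i
theorem pvRow_shift (c i : Int) :
    PySem.Str.join " " ((PySem.List.pyRange 0 i 1).map (fun j => PySem.Int.toStr (c + j)))
      = PySem.Str.join " " ((PySem.List.pyRange c (c + i) 1).map PySem.Int.toStr) := by
  have h : c + i - c = i - 0 := by ring
  simp only [PySem.List.pyRange_one, List.map_map, h]
  congr 1
  apply List.map_congr_left
  intro k _
  simp

-- main invariant: the fold over range(1, m+1) yields B's rows, with current_num = T(m)+1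
theorem pvFold_inv (m : Nat) :
    ((PySem.List.pyRange 1 ((m : Int) + 1) 1).foldl
      (fun (st : List String × Int) i =>
        let row := PySem.Str.join " " ((PySem.List.pyRange 0 i 1).map (fun j => PySem.Int.toStr (st.2 + j)))
        (st.1 ++ [row], st.2 + i))
      ([], 1))
    = ((PySem.List.pyRange 1 ((m : Int) + 1) 1).map pvRowB,
       ((m : Int) * ((m : Int) + 1)) / 2 + 1) := by
  induction m with
  | zero => simp [PySem.List.pyRange_one_eq_nil]
  | succ k ih =>
    have hsplit : PySem.List.pyRange 1 (((k : Int) + 1) + 1) 1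
        = PySem.List.pyRange 1 ((k : Int) + 1) 1 ++ [(k : Int) + 1] :=
      PySem.List.pyRange_one_succ_right (by omega)
    have hcast : ((k + 1 : Nat) : Int) = (k : Int) + 1 := by push_cast; ring
    rw [hcast, hsplit, List.foldl_append, ih]
    simp only [List.foldl_cons, List.foldl_nil, List.map_append, List.map_cons, List.map_nil]
    simp only [Prod.mk.injEq]
    constructor
    · congr 1
      rw [pvRow_shift]
      unfold pvRowB
      have hd : PySem.Int.floordiv (((k : Int) + 1) * ((k : Int) + 1 - 1)) 2
          = ((k : Int) * ((k : Int) + 1)) / 2 := by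
        rw [PySem.Int.floordiv_eq_ediv_of_pos (by omega)]
        congr 1; ring
      simp only [hd]
    · have h2 : (2 : Int) ∣ (k : Int) * ((k : Int) + 1) := Int.even_mul_succ_self k |>.two_dvd
      have h3 : ((k : Int) + 1) * ((k : Int) + 1 + 1) = (k : Int) * ((k : Int) + 1) + 2 * ((k : Int) + 1) := by ring
      omega

-- ===== VERDICT (by name: the statement is the Claim_ definition above) =====
theorem generate_floyds_triangle_spec : Claim_equal_generate_floyds_triangle := by
  intro n _
  unfold Spec_generate_floyds_triangle generate_floyds_triangle generate_floyds_triangle_alt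
  by_cases hn : n ≤ 0
  · rw [PySem.List.pyRange_one_eq_nil (show n + 1 ≤ 1 by omega)]
    rfl
  · obtain ⟨m, hm⟩ : ∃ m : Nat, n = (m : Int) := ⟨n.toNat, by omega⟩
    subst hm
    rw [pvFold_inv]
    rfl
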